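-- pv_equiv track=rewrite | github.com/prodyut1978/DFO_MAR_DataShop_ProcessingToolbox | src/datashop_toolbox/gui/rbr_to_odf_mainwindow.py | _split_string_get_end_number
-- ===== SOURCE A (Python) =====
-- def _split_string_get_end_number(s):
--     digits = ""
--     for i in range(len(s) - 1, -1, -1):
--         if s[i].isdigit():
--             digits = s[i] + digits
--         else:
--             break
--
--     if not digits:
--         return [s]
--
--     return [s[: -len(digits)], digits]
-- ===== SOURCE B (Python) =====
-- def _split_string_get_end_number(s):
--     stem = s.rstrip('0123456789')
--     if len(stem) == len(s):
--         return [s]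
--     return [stem, s[len(stem):]]
-- ===== Notes on version B (the rewrite author's own statement) =====
-- stated objective: idiomatic
-- what changed: Replaces the explicit reverse index loop with break by a single str.rstrip call over the ten ASCII digit characters and slicing at the stem length.
import Mathlib
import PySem

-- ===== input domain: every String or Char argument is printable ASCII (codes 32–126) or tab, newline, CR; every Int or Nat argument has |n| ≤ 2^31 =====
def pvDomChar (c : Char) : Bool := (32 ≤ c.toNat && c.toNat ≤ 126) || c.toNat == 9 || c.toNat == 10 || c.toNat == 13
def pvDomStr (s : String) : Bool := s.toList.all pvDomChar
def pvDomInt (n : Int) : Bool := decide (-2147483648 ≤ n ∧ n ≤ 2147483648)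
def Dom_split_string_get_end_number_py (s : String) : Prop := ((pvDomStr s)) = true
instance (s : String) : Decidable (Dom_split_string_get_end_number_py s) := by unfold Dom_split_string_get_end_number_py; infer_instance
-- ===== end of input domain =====

-- B replaces A's explicit reverse index loop (with break) by a single rstrip('0123456789')
-- and a slice at the stem length: same return value, more idiomatic.

-- ===== PORT A =====
-- the 'for i in range(len(s)-1, -1, -1)' loop with its break, as a countdown recursion:
-- pvAGo s (i+1) digits performs the iteration at index i and continues (or breaks).
def pvAGo (s : List Char) : Nat → List Char → List Char
  | 0, digits => digits
  | (i+1), digits =>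
    match PySem.List.pyGet? s (i : Int) with
    | some c => if PySem.Chars.isdigit c then pvAGo s i (c :: digits) else digits
    | none => digits   -- unreachable: 0 ≤ i < len s

def split_string_get_end_number_py (s : String) : List String :=
  let digits := pvAGo s.toList s.toList.length []
  if digits = [] then [s]
  else [PySem.Str.slice s none (some (-(digits.length : Int))), String.ofList digits]

-- ===== PORT B =====
-- s.rstrip('0123456789'): drop the trailing run of chars from the set, exact on all strings
-- (ported by hand as reverse/dropWhile/reverse since PySem has no chars-argument rstrip).
def pvRstripDigits (cs : List Char) : List Char :=
  (cs.reverse.dropWhile (fun c => "0123456789".toList.contains c)).reverse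

def split_string_get_end_number_py_alt (s : String) : List String :=
  let stem := pvRstripDigits s.toList
  if stem.length = s.toList.length then [s]
  else [String.ofList stem, PySem.Str.slice s (some (stem.length : Int)) none]

-- ===== PRECONDITION & SPEC =====
def Spec_split_string_get_end_number_py (s : String) (out : List String) : Prop := out = split_string_get_end_number_py_alt s
instance (s : String) (out : List String) : Decidable (Spec_split_string_get_end_number_py s out) := by unfold Spec_split_string_get_end_number_py; infer_instance

-- ===== CLAIM (what is proved, stated in full; the proofs are below) =====
def Claim_equal_split_string_get_end_number_py : Prop := ∀ (s : String), Dom_split_string_get_end_number_py s → Spec_split_string_get_end_number_py s (split_string_get_end_number_py s)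

-- ===== LEMMAS AND PROOFS =====
set_option maxRecDepth 4000

theorem pvDigitMem (c : Char) : ("0123456789".toList.contains c) = PySem.Chars.isdigit c := by
  show (['0','1','2','3','4','5','6','7','8','9'].contains c) = _
  simp only [PySem.Chars.isdigit, List.contains, List.elem_eq_mem, List.mem_cons, List.not_mem_nil, or_false]
  rw [Bool.eq_iff_iff]
  simp only [decide_eq_true_eq, Bool.and_eq_true]
  simp only [Char.ext_iff, Char.le_def, UInt32.le_iff_toNat_le, UInt32.ext_iff,
    show ('0').val.toNat = 48 from rfl, show ('1').val.toNat = 49 from rfl,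
    show ('2').val.toNat = 50 from rfl, show ('3').val.toNat = 51 from rfl,
    show ('4').val.toNat = 52 from rfl, show ('5').val.toNat = 53 from rfl,
    show ('6').val.toNat = 54 from rfl, show ('7').val.toNat = 55 from rfl,
    show ('8').val.toNat = 56 from rfl, show ('9').val.toNat = 57 from rfl]
  omega

-- A's loop computes the (reversed-back) maximal digit run of the reversed prefix
theorem pvAGo_eq (s : List Char) : ∀ (i : Nat), i ≤ s.length → ∀ (acc : List Char),
    pvAGo s i acc = ((s.take i).reverse.takeWhile PySem.Chars.isdigit).reverse ++ acc := by
  intro i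
  induction i with
  | zero => intro _ acc; simp [pvAGo]
  | succ i ih =>
    intro hle acc
    have hi : i < s.length := by omega
    have hget : s[i]? = some s[i] := List.getElem?_eq_getElem hi
    have : PySem.List.pyGet? s (i : Int) = s[i]? := by
      simp [PySem.List.pyGet?_natCast]
    rw [List.take_add_one]
    simp only [pvAGo, this, hget, List.reverse_append]
    by_cases hd : PySem.Chars.isdigit s[i]
    · simp only [hd, if_true]
      rw [ih (by omega) (s[i] :: acc)]
      simp [hd]
    · simp [hd]

theorem split_string_get_end_number_eq (s : String) :
    split_string_get_end_number_py s = split_string_get_end_number_py_alt s := by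
  unfold split_string_get_end_number_py split_string_get_end_number_py_alt pvRstripDigits
  have hpq : (fun c => "0123456789".toList.contains c) = PySem.Chars.isdigit := by
    funext c; exact pvDigitMem c
  rw [hpq]
  set r := s.toList.reverse with hr
  have htake : List.take s.length s.toList = s.toList := List.take_of_length_le (by simp)
  have hdig : pvAGo s.toList s.toList.length [] = (r.takeWhile PySem.Chars.isdigit).reverse := by
    rw [pvAGo_eq s.toList s.toList.length le_rfl []]
    simp [hr, htake]
  set tw := r.takeWhile PySem.Chars.isdigit with htw
  set dw := r.dropWhile PySem.Chars.isdigit with hdw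
  have hsplit : s.toList = dw.reverse ++ tw.reverse := by
    have h1 : tw ++ dw = r := List.takeWhile_append_dropWhile
    calc s.toList = r.reverse := by simp [hr]
      _ = (tw ++ dw).reverse := by rw [h1]
      _ = dw.reverse ++ tw.reverse := by simp
  have hlen : s.toList.length = dw.length + tw.length := by
    rw [hsplit]; simp

  rw [hdig]
  by_cases hnil : tw = []
  · simp [hnil, hlen]
  · have htwpos : 0 < tw.length := List.length_pos_of_ne_nil hnil
    have hcond : ¬ (tw.reverse = []) := by simpa using hnil
    have hcond2 : ¬ ((dw.reverse : List Char).length = s.toList.length) := by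
      simp only [List.length_reverse]; omega
    rw [if_neg hcond, if_neg hcond2]
    have e1 : PySem.Str.slice s none (some (-((tw.reverse : List Char).length : Int)))
        = String.ofList dw.reverse := by
      apply String.toList_injective
      simp only [PySem.Str.toList_slice, PySem.Chars.slice_eq_listSlice]
      rw [PySem.List.slice_to_neg_natCast _ _ (by simpa using htwpos)]
      rw [show s.toList.length - (tw.reverse : List Char).length = (dw.reverse : List Char).length by
        simp only [List.length_reverse]; omega]
      rw [hsplit, List.take_left, String.toList_ofList]
    have e2 : PySem.Str.slice s (some (((dw.reverse : List Char).length : Int))) none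
        = String.ofList tw.reverse := by
      apply String.toList_injective
      simp only [PySem.Str.toList_slice, PySem.Chars.slice_eq_listSlice]
      rw [PySem.List.slice_from_natCast]
      rw [hsplit, List.drop_left, String.toList_ofList]
    rw [e1, ← e2]

-- ===== VERDICT (by name: the statement is the Claim_ definition above) =====
theorem split_string_get_end_number_py_spec : Claim_equal_split_string_get_end_number_py := by
  intro s _
  exact split_string_get_end_number_eq s
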